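-- pv_equiv track=rewrite | github.com/lakshya076/Cinematch | Arnav/encryption.py | val_init
-- ===== SOURCE A (Python) =====
-- def fillZeros(bits: list[int], length: int = 8, endian: str = 'LE'):
--
--     '''
--
--     Fills zeroes in `bits` as per Big and Little `endian`
--
--     Returns `list`
--
--     '''
--
--     l = len(bits)
--     if endian == 'LE':
--         for i in range(l, length):
--             bits.append(0)
--     else:
--         while l < length:
--             bits.insert(0, 0)
--             l = len(bits)
--     return bits
--
-- def val_init(vals: list[str]):
--
--     '''
--
--     Initialises predetermined hex values in `vals`
--
--     Returns `list`
--
--     '''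
--
--     binaries = [bin(int(str(i), 16))[2:] for i in vals]
--
--     words = []
--     for binary in binaries:
--         word = []
--         for b in binary:
--             word.append(int(b))
--         words.append(fillZeros(word, 32, 'BE'))
--     return words
-- ===== SOURCE B (Python) =====
-- def val_init(vals: list[str]):
--     '''Same result as A: hex strings to 32-bit (or wider) big-endian bit lists, by shift/mask instead of string parsing.'''
--     words = []
--     for val in vals:
--         n = int(str(val), 16)
--         width = max(32, n.bit_length())
--         words.append([(n >> (width - 1 - i)) & 1 for i in range(width)])
--     return words
-- ===== Notes on version B (the rewrite author's own statement) =====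
-- stated objective: idiomatic
-- what changed: B computes each bit arithmetically by shift-and-mask over a computed width max(32, bit_length) instead of formatting a binary string, parsing each character back to int, and zero-padding with the fillZeros insert loop.
import Mathlib
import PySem

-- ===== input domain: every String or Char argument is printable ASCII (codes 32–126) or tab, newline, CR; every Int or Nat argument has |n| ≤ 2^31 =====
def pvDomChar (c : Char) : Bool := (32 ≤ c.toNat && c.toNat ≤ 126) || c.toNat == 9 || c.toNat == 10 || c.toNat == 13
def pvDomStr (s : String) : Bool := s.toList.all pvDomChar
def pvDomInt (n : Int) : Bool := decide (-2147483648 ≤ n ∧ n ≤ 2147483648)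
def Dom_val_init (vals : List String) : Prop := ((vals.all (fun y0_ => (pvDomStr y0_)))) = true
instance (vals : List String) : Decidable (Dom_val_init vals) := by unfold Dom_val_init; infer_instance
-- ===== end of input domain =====

-- B replaces A's binary-string formatting, per-character int() parsing and fillZeros front-insert
-- padding loop by direct arithmetic bit extraction (shift and mask) over width max(32, bit_length).

-- ===== PORT A =====
-- fillZeros's BE branch: while l < length: bits.insert(0, 0); l = len(bits)
def fillZerosBE (bits : List Int) (length : Int) : List Int :=
  if (bits.length : Int) < length then fillZerosBE (0 :: bits) length else bits
termination_by (length - bits.length).toNat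
decreasing_by simp only [List.length_cons]; omega

-- fillZeros(bits, length=8, endian='LE') — defaults passed explicitly at the call site
def fillZeros (bits : List Int) (length : Int) (endian : String) : List Int :=
  if endian = "LE" then
    (PySem.List.pyRange (bits.length : Int) length 1).foldl (fun b _ => b ++ [0]) bits
  else fillZerosBE bits length

def val_init (vals : List String) : List (List Int) :=
  -- binaries = [bin(int(str(i), 16))[2:] for i in vals]   (as char lists)
  let binaries := vals.map (fun i =>
    PySem.List.slice (PySem.Int.pyBin ((PySem.Int.ofStrBase? i 16).getD 0)).toList (some 2) none)
  binaries.foldl (fun words binary =>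
    let word := binary.foldl (fun w b => w ++ [(PySem.Int.ofChars? [b]).getD 0]) []
    words ++ [fillZeros word 32 "BE"]) []

-- ===== PORT B =====
def val_init_alt (vals : List String) : List (List Int) :=
  vals.foldl (fun words val =>
    let n := (PySem.Int.ofStrBase? val 16).getD 0
    let width : Int := max 32 (PySem.Int.bitLength n : Int)
    words ++ [(PySem.List.pyRange 0 width 1).map
      (fun i => PySem.Int.band (n >>> (width - 1 - i).toNat) 1)]) []

-- ===== PRECONDITION & SPEC =====
-- Pre_ excludes exactly the inputs where Python A raises ValueError: strings int(·, 16) rejects,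
-- and strings of negative value (there bin(n)[2:] starts with 'b', so int('b') raises).
-- (getD (-1) is the parse result; none and negative results are both rejected by 0 ≤ ·.)
def Pre_val_init (vals : List String) : Prop :=
  ∀ s ∈ vals, 0 ≤ (PySem.Int.ofStrBase? s 16).getD (-1)
instance (vals : List String) : Decidable (Pre_val_init vals) := by unfold Pre_val_init; infer_instance

def pvWitness_val_init : List String := ["1f", "0", "DeadBeef", "ffffffffff"]

def Spec_val_init (vals : List String) (out : List (List Int)) : Prop := out = val_init_alt vals
instance (vals : List String) (out : List (List Int)) : Decidable (Spec_val_init vals out) := by unfold Spec_val_init; infer_instance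

-- ===== CLAIM (what is proved, stated in full; the proofs are below) =====
def Claim_equal_val_init : Prop := ∀ (vals : List String), Dom_val_init vals → Pre_val_init vals → Spec_val_init vals (val_init vals)

-- ===== LEMMAS AND PROOFS =====

-- MSB-first bit extraction over a Nat: the common normal form of both per-string words
def msb (m W : Nat) : List Int := (List.range W).map (fun k => ((m >>> (W - 1 - k)) &&& 1 : Nat))

-- int(c) of a binary digit character
lemma charVal_digitChar (d : Nat) (hd : d < 2) :
    (PySem.Int.ofChars? [Nat.digitChar d]).getD 0 = (d : Int) := by
  interval_cases d <;> decide

-- one-step unfolding of core's toDigitsCore (definitional)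
lemma toDigitsCore_succ (b f n : Nat) (ds : List Char) : Nat.toDigitsCore b (f+1) n ds =
    if n / b = 0 then (n % b).digitChar :: ds
    else Nat.toDigitsCore b f (n / b) ((n % b).digitChar :: ds) := rfl

lemma toDigitsCore_eq (f : Nat) : ∀ (n : Nat) (acc : List Char), n ≤ f →
    Nat.toDigitsCore 2 (f + 1) n acc =
      ((Nat.digits 2 n).reverse.map Nat.digitChar) ++ (if n = 0 then '0' :: acc else acc) := by
  induction f with
  | zero =>
    intro n acc hn
    interval_cases n
    simp [toDigitsCore_succ]
    decide
  | succ f ih =>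
    intro n acc hn
    rcases Nat.eq_zero_or_pos n with h0 | h0
    · subst h0; simp [toDigitsCore_succ]; decide
    rw [Nat.digits_def' (by norm_num) h0]
    by_cases h2 : n / 2 = 0
    · have h1 : n = 1 := by omega
      subst h1
      simp [toDigitsCore_succ]
    · rw [toDigitsCore_succ, if_neg h2, ih (n / 2) _ (by omega)]
      simp [h2, h0.ne']

lemma toDigits_eq (m : Nat) :
    Nat.toDigits 2 m = ((Nat.digits 2 m).reverse.map Nat.digitChar) ++ (if m = 0 then ['0'] else []) := by
  rw [Nat.toDigits, toDigitsCore_eq m m [] le_rfl]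

lemma blen_eq (m : Nat) : PySem.Int.bitLength (m : Int) = (Nat.digits 2 m).length := by
  induction m using Nat.strong_induction_on with
  | _ m ih =>
    rcases Nat.eq_zero_or_pos m with h0 | h0
    · subst h0; simp
    · rw [PySem.Int.bitLength_natCast h0, Nat.digits_def' (by norm_num) h0,
        List.length_cons, ih (m / 2) (by omega)]

lemma msb_succ_top (m W : Nat) (h : m < 2 ^ W) : msb m (W + 1) = 0 :: msb m W := by
  simp only [msb, List.range_succ_eq_map, List.map_cons, List.map_map]
  congr 1
  · simp [Nat.shiftRight_eq_div_pow, Nat.div_eq_of_lt h]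
  · apply List.map_congr_left
    intro k hk
    simp only [Function.comp, Nat.succ_eq_add_one]
    congr 3
    omega

lemma msb_snoc (m W : Nat) : msb m (W + 1) = msb (m / 2) W ++ [((m % 2 : Nat) : Int)] := by
  simp only [msb, List.range_succ, List.map_append, List.map_cons, List.map_nil]
  congr 1
  · apply List.map_congr_left
    intro k hk
    simp only [List.mem_range] at hk
    rw [show W + 1 - 1 - k = (W - 1 - k) + 1 by omega, Nat.shiftRight_succ_inside]
  · simp [Nat.and_one_is_mod]

lemma msb_digits (m : Nat) :
    msb m (Nat.digits 2 m).length = (Nat.digits 2 m).reverse.map (fun (d : Nat) => (d : Int)) := by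
  induction m using Nat.strong_induction_on with
  | _ m ih =>
    rcases Nat.eq_zero_or_pos m with h0 | h0
    · subst h0; simp [msb]
    · rw [Nat.digits_def' (by norm_num) h0, List.length_cons, msb_snoc,
        ih (m / 2) (by omega)]
      simp

lemma msb_pad (m D W : Nat) (hDW : D ≤ W) (hm : m < 2 ^ D) :
    msb m W = List.replicate (W - D) 0 ++ msb m D := by
  induction W, hDW using Nat.le_induction with
  | base => simp
  | succ W hDW ih =>
    rw [msb_succ_top m W (lt_of_lt_of_le hm (Nat.pow_le_pow_right (by norm_num) hDW)), ih]
    rw [show W + 1 - D = (W - D) + 1 by omega, List.replicate_succ]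
    simp

lemma fillZerosBE_eq (bits : List Int) (len : Int) :
    fillZerosBE bits len = List.replicate ((len - bits.length).toNat) 0 ++ bits := by
  fun_induction fillZerosBE bits len with
  | case1 bits h ih =>
    rw [ih]
    rw [show ((len - (bits.length:Int)).toNat) = ((len - ((0::bits).length : Int)).toNat) + 1 by simp; omega,
      List.replicate_succ']
    simp
  | case2 bits h =>
    rw [show ((len - ((bits:List Int).length:Int)).toNat) = 0 by omega]
    simp

-- B's word is msb over the computed width
lemma alt_word_eq (m : Nat) :
    (PySem.List.pyRange 0 (max 32 (PySem.Int.bitLength (m : Int) : Int)) 1).map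
        (fun i => PySem.Int.band ((m : Int) >>> ((max 32 (PySem.Int.bitLength (m : Int) : Int)) - 1 - i).toNat) 1)
      = msb m (max 32 (PySem.Int.bitLength (m : Int))) := by
  set bl := PySem.Int.bitLength (m : Int) with hbl
  have hW : ((max 32 (bl : Int)) - 0).toNat = max 32 bl := by omega
  rw [PySem.List.pyRange_one, List.map_map, hW, msb]
  apply List.map_congr_left
  intro k hk
  simp only [List.mem_range] at hk
  simp only [Function.comp, zero_add]
  have hidx : ((max 32 (bl : Int)) - 1 - (k : Int)).toNat = max 32 bl - 1 - k := by omega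
  rw [hidx, show ((m:Int) >>> (max 32 bl - 1 - k)) = ((m >>> (max 32 bl - 1 - k) : Nat) : Int) by simp,
    show (1:Int) = ((1:Nat):Int) by simp, PySem.Int.band_natCast]

-- A's word before padding: the binary string's characters parsed back to ints
lemma a_word_eq (m : Nat) :
    ((PySem.List.slice (PySem.Int.pyBin (m : Int)).toList (some 2) none).map
        (fun b => (PySem.Int.ofChars? [b]).getD 0))
      = if m = 0 then [0] else (Nat.digits 2 m).reverse.map (fun (d : Nat) => (d : Int)) := by
  rw [PySem.Int.toList_pyBin, PySem.List.slice_from _ (by norm_num)]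
  have h1 : PySem.Int.toBinChars0b (m : Int) = '0' :: 'b' :: Nat.toDigits 2 m := by
    simp [PySem.Int.toBinChars0b]
  rw [h1]
  show (Nat.toDigits 2 m).map _ = _
  rw [toDigits_eq]
  by_cases h0 : m = 0
  · subst h0; simp; decide
  · rw [if_neg h0, if_neg h0, List.append_nil, List.map_map]
    apply List.map_congr_left
    intro d hd
    simp only [List.mem_reverse] at hd
    exact charVal_digitChar d (Nat.digits_lt_base (by norm_num) hd)

-- the per-string word equality
lemma word_eq (m : Nat) :
    fillZeros (((PySem.List.slice (PySem.Int.pyBin (m : Int)).toList (some 2) none)).map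
        (fun b => (PySem.Int.ofChars? [b]).getD 0)) 32 "BE"
    = (PySem.List.pyRange 0 (max 32 (PySem.Int.bitLength (m : Int) : Int)) 1).map
        (fun i => PySem.Int.band ((m : Int) >>> ((max 32 (PySem.Int.bitLength (m : Int) : Int)) - 1 - i).toNat) 1) := by
  rw [alt_word_eq]
  rw [fillZeros, if_neg (by decide), fillZerosBE_eq, a_word_eq]
  by_cases h0 : m = 0
  · subst h0
    rw [if_pos rfl]
    decide
  · rw [if_neg h0]
    have hlen : (Nat.digits 2 m).length = PySem.Int.bitLength (m : Int) := (blen_eq m).symm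
    have hm : m < 2 ^ PySem.Int.bitLength (m : Int) := by
      have := PySem.Int.lt_two_pow_bitLength (m : Int)
      simpa using this
    rw [← msb_digits, hlen, msb_pad m _ _ (le_max_right _ _) hm]
    have hml : (msb m (PySem.Int.bitLength (m:Int))).length = PySem.Int.bitLength (m:Int) := by
      simp [msb]
    congr 2
    omega

-- ===== VERDICT (by name: the statement is the Claim_ definition above) =====
theorem val_init_spec : Claim_equal_val_init := by
  intro vals _hdom hpre
  unfold Spec_val_init val_init val_init_alt
  simp only [List.foldl_map, PySem.List.foldl_append_singleton_eq_map, List.nil_append]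
  apply List.map_congr_left
  intro s hs
  have h := hpre s hs
  cases hn : PySem.Int.ofStrBase? s 16 with
  | none => rw [hn] at h; simp at h
  | some n =>
    rw [hn] at h
    simp only [Option.getD_some] at h
    simp only [Option.getD_some]
    lift n to Nat using h with m
    exact word_eq m
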